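-- pv_equiv track=rewrite | github.com/vishalpmittal/practice-fun | funNLearn/src/main/java/leetcode/algorithms/P601_P700/P693_BinaryNumberWithAlternatingBits.py | hasAlternatingBits_x
-- ===== SOURCE A (Python) =====
-- def hasAlternatingBits_x(n: int) -> bool:
--     comp = n & 1
--     while n > 0:
--         if (n & 1) != comp:
--             return False
--         # right shift number by 1 digit
--         n = n >> 1
--         # swap between 0 and 1
--         comp = (comp+1) & 1
--     return True
-- ===== SOURCE B (Python) =====
-- def hasAlternatingBits_x(n: int) -> bool:
--     if n <= 0:
--         return True
--     x = n ^ (n >> 1)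
--     return (x & (x + 1)) == 0
-- ===== Notes on version B (the rewrite author's own statement) =====
-- stated objective: alternative
-- what changed: Replaces the bit-by-bit comparison loop with the closed-form XOR trick: x = n ^ (n >> 1) has all ones exactly when the bits of n alternate, checked by (x & (x+1)) == 0; a non-positive guard covers the inputs where A's while loop never runs (both return True there).
import Mathlib
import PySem

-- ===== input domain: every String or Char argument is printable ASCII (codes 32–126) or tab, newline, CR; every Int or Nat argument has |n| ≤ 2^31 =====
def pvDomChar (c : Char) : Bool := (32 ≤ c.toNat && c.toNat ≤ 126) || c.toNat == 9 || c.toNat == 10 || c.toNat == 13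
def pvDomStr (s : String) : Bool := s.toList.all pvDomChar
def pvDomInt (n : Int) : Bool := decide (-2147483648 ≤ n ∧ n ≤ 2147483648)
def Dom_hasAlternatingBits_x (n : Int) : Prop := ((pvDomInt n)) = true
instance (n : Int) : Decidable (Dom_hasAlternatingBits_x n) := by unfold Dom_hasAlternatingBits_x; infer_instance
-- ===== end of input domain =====

-- B replaces A's bit-by-bit comparison loop by the closed-form check: x = n ^ (n >> 1)
-- must be all ones, tested by (x & (x+1)) == 0 (guarded by n <= 0, where A's loop never runs).

-- ===== PORT A =====
-- A's while loop: state (n, comp), right-shifting n and flipping comp each round.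
def pvLoopA (n comp : Int) : Bool :=
  if h : 0 < n then
    if PySem.Int.band n 1 ≠ comp then false
    else pvLoopA (n >>> (1 : Nat)) (PySem.Int.band (comp + 1) 1)
  else true
termination_by n.toNat
decreasing_by
  have hm : n = ((n.toNat : Nat) : Int) := by omega
  rw [hm, ← Int.natCast_shiftRight, Nat.shiftRight_eq_div_pow]
  simp only [Int.toNat_natCast]
  omega

def hasAlternatingBits_x (n : Int) : Bool := pvLoopA n (PySem.Int.band n 1)

-- ===== PORT B =====
def hasAlternatingBits_x_alt (n : Int) : Bool :=
  if n ≤ 0 then true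
  else
    let x := PySem.Int.bxor n (n >>> (1 : Nat))
    PySem.Int.band x (x + 1) == 0

-- ===== PRECONDITION & SPEC =====
def Spec_hasAlternatingBits_x (n : Int) (out : Bool) : Prop := out = hasAlternatingBits_x_alt n
instance (n : Int) (out : Bool) : Decidable (Spec_hasAlternatingBits_x n out) := by unfold Spec_hasAlternatingBits_x; infer_instance

-- ===== CLAIM (what is proved, stated in full; the proofs are below) =====
def Claim_equal_hasAlternatingBits_x : Prop := ∀ (n : Int), Dom_hasAlternatingBits_x n → Spec_hasAlternatingBits_x n (hasAlternatingBits_x n)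

-- ===== LEMMAS AND PROOFS =====

-- Nat-level version of A's loop (proof helper).
def pvLoopN (m c : Nat) : Bool :=
  if m = 0 then true
  else if m % 2 ≠ c then false
  else pvLoopN (m / 2) ((c + 1) % 2)
termination_by m
decreasing_by omega

theorem pvLoopA_natCast (m c : Nat) : pvLoopA (m : Int) (c : Int) = pvLoopN m c := by
  induction m using Nat.strong_induction_on generalizing c with
  | _ m ih =>
    rw [pvLoopA, pvLoopN]
    by_cases hm : m = 0
    · subst hm; simp
    · have hpos : (0 : Int) < (m : Int) := by exact_mod_cast Nat.pos_of_ne_zero hm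
      rw [dif_pos hpos]
      have h1 : PySem.Int.band (m : Int) 1 = ((m % 2 : Nat) : Int) := by
        have := PySem.Int.band_natCast m 1
        simpa [Nat.and_one_is_mod] using this
      have h2 : ((m : Int) >>> (1 : Nat)) = ((m / 2 : Nat) : Int) := by
        rw [← Int.natCast_shiftRight]; norm_num [Nat.shiftRight_eq_div_pow]
      have h3 : PySem.Int.band ((c : Int) + 1) 1 = (((c + 1) % 2 : Nat) : Int) := by
        have := PySem.Int.band_natCast (c + 1) 1
        simpa [Nat.and_one_is_mod] using this
      rw [h1, h2, h3, if_neg hm]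
      by_cases hc : m % 2 = c
      · rw [if_neg (by simp [hc]), if_neg (by omega : ¬ m % 2 ≠ c)]
        exact ih (m / 2) (by omega) _
      · rw [if_pos (by exact_mod_cast hc), if_pos hc]

-- x & (x+1) == 0, i.e. x is all ones (proof helper).
def pvAllOnes (x : Nat) : Bool := x &&& (x + 1) == 0

theorem pv_and_even (y : Nat) : (2 * y) &&& (2 * y + 1) = 2 * y := by
  apply Nat.eq_of_testBit_eq
  intro i
  cases i with
  | zero => simp [Nat.testBit_zero, Nat.mul_mod_right, Nat.add_mod]
  | succ i =>
      have e1 : (2 * y) / 2 = y := by omega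
      have e2 : (2 * y + 1) / 2 = y := by omega
      rw [Nat.testBit_and]
      simp only [Nat.testBit_add_one]
      rw [e1, e2, Bool.and_self]

theorem pv_and_odd (y : Nat) : (2 * y + 1) &&& (2 * y + 2) = 2 * (y &&& (y + 1)) := by
  apply Nat.eq_of_testBit_eq
  intro i
  cases i with
  | zero => simp [Nat.testBit_zero, Nat.mul_mod_right, Nat.add_mod]
  | succ i =>
      have e1 : (2 * y + 1) / 2 = y := by omega
      have e2 : (2 * y + 2) / 2 = y + 1 := by omega
      have e3 : (2 * (y &&& (y + 1))) / 2 = y &&& (y + 1) := by omega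
      rw [Nat.testBit_and]
      simp only [Nat.testBit_add_one]
      rw [e1, e2, e3, Nat.testBit_and]

theorem pv_xor_div_two (a b : Nat) : (a ^^^ b) / 2 = a / 2 ^^^ b / 2 := by
  apply Nat.eq_of_testBit_eq
  intro i
  rw [← Nat.testBit_add_one, Nat.testBit_xor, Nat.testBit_xor,
      ← Nat.testBit_add_one, ← Nat.testBit_add_one]

-- The key fact: A's loop, started with comp = m % 2, computes the all-ones test of m ^^^ m/2.
theorem pv_key (m : Nat) : pvLoopN m (m % 2) = pvAllOnes (m ^^^ m / 2) := by
  induction m using Nat.strong_induction_on with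
  | _ m ih =>
    by_cases hm : m = 0
    · subst hm; simp [pvLoopN, pvAllOnes]
    · rw [pvLoopN, if_neg hm, if_neg (by omega : ¬ m % 2 ≠ m % 2)]
      by_cases hm' : m / 2 = 0
      · have : m = 1 := by omega
        subst this
        norm_num
        rw [pvLoopN]
        norm_num [pvAllOnes]
      · -- x = m ^^^ m/2 : its parity and its half
        have hx2 : (m ^^^ m / 2) / 2 = m / 2 ^^^ (m / 2) / 2 := pv_xor_div_two m (m / 2)
        have hxmod : (m ^^^ m / 2) % 2 = (m + m / 2) % 2 := Nat.xor_mod_two_eq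
        have hxne : m ^^^ m / 2 ≠ 0 := by
          intro h
          have := Nat.xor_eq_zero_iff.mp h
          omega
        by_cases hc : m / 2 % 2 = m % 2
        · -- loop fails at the next step; x is even and nonzero, so not all ones
          rw [pvLoopN, if_neg hm', if_pos (by omega)]
          have hxeven : (m ^^^ m / 2) % 2 = 0 := by omega
          obtain ⟨y, hy⟩ : ∃ y, m ^^^ m / 2 = 2 * y := ⟨(m ^^^ m / 2) / 2, by omega⟩
          rw [hy]
          simp only [pvAllOnes, pv_and_even]
          have hy0 : 2 * y ≠ 0 := by omega
          simp [hy0]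
        · -- loop continues with comp = m/2 % 2; x is odd, peel off its low bit
          have hcomp : (m % 2 + 1) % 2 = m / 2 % 2 := by omega
          rw [hcomp, ih (m / 2) (by omega)]
          have hxodd : (m ^^^ m / 2) % 2 = 1 := by omega
          obtain ⟨y, hy⟩ : ∃ y, m ^^^ m / 2 = 2 * y + 1 := ⟨(m ^^^ m / 2) / 2, by omega⟩
          have hy2 : m / 2 ^^^ m / 2 / 2 = y := by rw [← hx2]; omega
          rw [hy2, hy]
          show pvAllOnes y = pvAllOnes (2 * y + 1)
          simp only [pvAllOnes]
          have h21 : 2 * y + 1 + 1 = 2 * y + 2 := by omega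
          rw [h21, pv_and_odd]
          generalize y &&& (y + 1) = g
          cases g <;> simp

-- ===== VERDICT (by name: the statement is the Claim_ definition above) =====
theorem hasAlternatingBits_x_spec : Claim_equal_hasAlternatingBits_x := by
  intro n _
  unfold Spec_hasAlternatingBits_x hasAlternatingBits_x hasAlternatingBits_x_alt
  by_cases hn : n ≤ 0
  · rw [pvLoopA, dif_neg (by omega), if_pos hn]
  · rw [if_neg hn]
    obtain ⟨m, rfl⟩ : ∃ m : Nat, n = ((m : Nat) : Int) := ⟨n.toNat, by omega⟩
    have hb : PySem.Int.band ((m : Nat) : Int) 1 = ((m % 2 : Nat) : Int) := by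
      have := PySem.Int.band_natCast m 1
      simpa [Nat.and_one_is_mod] using this
    have hs : (((m : Nat) : Int) >>> (1 : Nat)) = ((m / 2 : Nat) : Int) := by
      rw [← Int.natCast_shiftRight]; norm_num [Nat.shiftRight_eq_div_pow]
    rw [hb, hs, pvLoopA_natCast, pv_key, PySem.Int.bxor_natCast]
    simp only [pvAllOnes]
    rw [show (((m ^^^ m / 2 : Nat)) : Int) + 1 = ((((m ^^^ m / 2) + 1 : Nat)) : Int) from by norm_cast,
        PySem.Int.band_natCast]
    simp
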